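/-
  SMOKE TESTS of Vorbis/Spec/DecodeResidue.lean: the precondition of `decode_residue.spec` is "`DecodeInv` + `ShadowPre` + `Args`"
  and gives back every clause of CONTRACTS 60; the postcondition gives the caller its `DecodeInv` back; the assertions let a worker
  take the key steps (the unchecked allocation succeeds; fact K for the three paths; the ghost part of `arena_temp_restore`'s
  precondition at `done:` with `p = temp_alloc_point = L`; the postcondition from what segment 11 establishes; the run's block
  predicate satisfies `BlkFree`). Nothing here is used by a statement.
-/
import Vorbis.Spec.DecodeResidue
namespace Vorbis.Spec.DecodeResidueTest
open X86 X86.User Asan Vorbis Vorbis.Spec Vorbis.Spec.DecodeResidue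

/-- **The precondition from the decode-time invariant**: what vorbis_decode_packet_rest.9 has at the call (`DecodeInv` of the
current memory for the decoder object in rdi) + the shadow clause of the callee's entry state + the arguments. Nothing else is
asked: the readers' environment, `BlkFree`, the arena above the text, SEP, the codebooks apart from `*f`, ADO are in the invariant. -/
example (len : Nat) (A : Arena) (others : List Obj) (frames : List (Nat × FrameLayout)) (stored room : Int) (ysz : Nat → Nat)
    (u : State)
    (hinv : DecodeInv others frames len A stored room ysz u.mem (u.reg .rdi).toNat)
    (hsh : ShadowPre others frames u)
    (hargs : Args others frames u.mem (u.reg .rdi).toNat (u.reg .rsi).toNat ((u.reg .rdx).toNat % 2 ^ 32)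
      ((u.reg .rcx).toNat % 2 ^ 32) ((u.reg .r8).toNat % 2 ^ 32) (u.reg .r9).toNat ((u.reg .rsp).toNat + 8)) :
    (decode_residue.spec len A others frames stored room ysz).pre u :=
  ⟨hsh, hinv, hargs⟩

/-- **Every clause of CONTRACTS 60 from the precondition** (the former fields of `Pre`, now theorems): the environment of a check
site, the readers' environment, `BlkFree`, the arena above the text, `VorbisOK f`, SEP, the codebooks apart from `*f`, ADO — for
the run's block predicate. -/
example (len : Nat) (A : Arena) (others : List Obj) (frames : List (Nat × FrameLayout)) (stored room : Int) (ysz : Nat → Nat)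
    (u : State) (h : (decode_residue.spec len A others frames stored room ysz).pre u) :
    Env (RunBlk A len) (Live (stackObjs frames ++ others)) u.mem ∧
    ReaderEnv others frames (RunBlk A len) len (u.reg .rdi).toNat ∧
    BlkFree (RunBlk A len) A ∧
    L.textHi ≤ A.B ∧
    Real.VorbisOK len (RunBlk A len) u.mem (u.reg .rdi).toNat ∧
    Separated (RunBlk A len) u.mem (u.reg .rdi).toNat ∧
    (∀ i : Nat, (i : Int) < stb_vorbis.codebook_count u.mem (u.reg .rdi).toNat →
      BookApart u.mem (u.reg .rdi).toNat (stb_vorbis.codebooks_at u.mem (u.reg .rdi).toNat i)) ∧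
    ADO A others u.mem (u.reg .rdi).toNat := by
  have hpre : Pre len A others frames stored room ysz u := h
  exact ⟨hpre.env, hpre.reader, hpre.free, hpre.arenaText, hpre.vorbis, hpre.sep, hpre.books, hpre.ado⟩

/-- **The postcondition gives the caller its invariant back**: `DecodeInv` for the SAME ghosts and the memory at the return (so
vorbis_decode_packet_rest.9 goes on with the assertion it had before the call), with `VorbisOK f`, SEP and ADO as its parts. -/
example (len : Nat) (A : Arena) (others : List Obj) (frames : List (Nat × FrameLayout)) (stored room : Int) (ysz : Nat → Nat)
    (u v : State) (h : (decode_residue.spec len A others frames stored room ysz).post u v) :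
    DecodeInv others frames len A stored room ysz v.mem (u.reg .rdi).toNat ∧
    Real.VorbisOK len (RunBlk A len) v.mem (u.reg .rdi).toNat ∧
    Separated (RunBlk A len) v.mem (u.reg .rdi).toNat ∧
    ADO A others v.mem (u.reg .rdi).toNat := by
  have hpost : Post len A others frames stored room ysz u v := h
  exact ⟨hpost.inv, hpost.vorbis, hpost.sep, hpost.ado⟩

/-- **The function's `Returned` from what segment 11 establishes** at the state after the `ret`: the walker's facts (rip, rsp, the
saved registers, the code, the ABI invariant), the footprint, the caller's shadow layer, `Bits`, ADO for the entry's arena and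
`μ`; the postcondition — `DecodeInv` of the memory at the return — is `Entered.post`. -/
example {u₀ : State} {g : G} (he : Entered u₀ g) (v : State)
    (hrip : v.rip = g.ret) (hrsp : v.reg .rsp = g.e.reg .rsp + 8) (hsaved : RegsKept callerSaved g.e v)
    (hcode : (conv u₀).code.In v.mem) (hinv : (conv u₀).inv v)
    (same : Mem.SameExcept (g.spec.footprint g.e) g.e.mem v.mem)
    (shadow : ShadowInv g.others g.frames (v.reg .rsp).toNat v.mem)
    (bits : Bits g.Blk g.len v.mem g.f)
    (ado : ADO g.A g.others v.mem g.f)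
    (mu_le : mu v.mem g.f ≤ mu g.e.mem g.f) : Returned (conv u₀) g.spec g.e g.ret v :=
  ⟨hrip, hrsp, hsaved, same, hcode, hinv, he.post same shadow bits ado mu_le⟩

/-- **The run's block predicate satisfies `BlkFree`** when the fixed objects lie outside the arena (B = 800000H in the run). -/
example (len : Nat) (hlen : len ≤ 0x1FF000) {A : Arena} {others : List Obj} {mem : Mem} {f : Nat} (h : ArenaOK A others mem f)
    (hB : 0x800000 ≤ A.B) : BlkFree (runBlk A (fixedBlocks len)) A := by
  apply BlkFree.of_runBlk h
  · exact fixed_off_stack len hlen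
  · intro C hC
    simp only [fixedBlocks, globalBlocks, blockOUT, inBlock, IN, List.mem_cons, List.mem_nil_iff, or_false] at hC
    rcases hC with rfl | rfl | rfl | rfl | rfl | rfl | rfl | rfl <;> simp only [] <;> omega

/-- **T3: the unchecked allocation of segment 1 succeeds**: the request `sz = C·(8 + 8·part_read)` is at most
`temp_memory_required`, so under ADO it fits, and the block it returns is TB. -/
example {u₀ : State} {g : G} (he : Entered u₀ g) :
    g.A.Fits g.sz ∧ g.A'.TBlock g.TB.base g.TB.size ∧ g.TB.base ≠ 0 := by
  have hv := he.pre.vorbis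
  have hT1 : T1 g.e.mem g.f := hv.temp
  have hR : ResidueOK g.Blk g.e.mem g.f := hv.residue
  have hreq := T3_decode_residue hT1 hR he.pre.args.rn_lt he.pre.args.n_le
  have hado := he.pre.ado
  have h8 : r8 g.sz ≤ stb_vorbis.temp_memory_required g.e.mem g.f := r8_le_of_le hreq hado.tmr8
  obtain ⟨hfit, htb, hne, _⟩ := temp_alloc_ok hado h8
  exact ⟨hfit, htb, hne⟩

/-- **Fact K on path B** (the `residue_decode` call of segment 10): `offset + part_size ≤ 2·n ≤ blocksize_1`, in the memory of
the cut point. -/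
example {u₀ : State} {g : G} {v : State} (he : Entered u₀ g) (c : Common u₀ g v) {pc : Nat} (hpc : pc < g.PRD) :
    Residue.begin v.mem g.r + pc * Residue.part_size v.mem g.r + Residue.part_size v.mem g.r ≤ 2 * g.n := by
  have hK := Residue.factK (c.resAt he) (A := Res.actualDec g.rtype g.n) (pc := pc) (by rw [c.prd]; exact hpc)
  have ha := Res.actualDec_le g.rtype g.n
  omega

/-- **Fact K on path A** (CI of segments 4 and 6): `z(pcount) + part_size ≤ n·ch` when `rtype = 2`, `ch ≥ 2`. -/
example {u₀ : State} {g : G} {v : State} (he : Entered u₀ g) (c : Common u₀ g v) (h2 : g.rtype = 2) (hch : 2 ≤ g.ch) {pc : Nat}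
    (hpc : pc < g.PRD) :
    Residue.begin v.mem g.r + pc * Residue.part_size v.mem g.r + Residue.part_size v.mem g.r ≤ g.n * g.ch := by
  apply Residue.factK_pos (c.resAt he) hch
  have e := c.prd
  rw [h2] at e
  rw [e]
  exact hpc

/-- **`done:`** the ghost part of `arena_temp_restore`'s precondition with `p = temp_alloc_point = L`: the one outstanding block
is released (`dead = [(T', sz)]`, `keep = []`), and the arena and the live list are the entry's again. -/
example {u₀ : State} {g : G} {v : State} (he : Entered u₀ g) (c : Common u₀ g v) :
    g.A'.temps = [(g.A'.T, g.sz)] ++ [] ∧ TempChain g.A'.T [(g.A'.T, g.sz)] g.tap ∧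
      g.A'.withTemp g.tap [] = g.A ∧
      dropObjs ([(g.A'.T, g.sz)].map g.A'.tempObj) g.others' = g.others := by
  have hb : ADOBusy g.A' g.others' v.mem g.f g.sz := c.point.busy
  have hado := he.pre.ado
  refine ⟨?_, ?_, hado.roundtrip g.sz, ?_⟩
  · rw [hb.one]
    rfl
  · have h4 := hb.ok.AR4
    rw [hb.one] at h4
    exact h4
  · have hv := he.pre.vorbis
    have hT1 : T1 g.e.mem g.f := hv.temp
    have hR : ResidueOK g.Blk g.e.mem g.f := hv.residue
    have hreq := T3_decode_residue hT1 hR he.pre.args.rn_lt he.pre.args.n_le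
    have h8 : r8 g.sz ≤ stb_vorbis.temp_memory_required g.e.mem g.f := r8_le_of_le hreq hado.tmr8
    have hfit := (temp_alloc_ok hado h8).1
    exact dropObjs_cons_self (hado.ok.newTemp_not_mem g.sz hfit)

/-- **R7b for the loops**: `classwords ≥ 1`, and the slot index is inside the row at a `while` head with `pcount < part_read`. -/
example {u₀ : State} {g : G} {v : State} (he : Entered u₀ g) (c : Common u₀ g v) {pass cs pcount : Nat}
    (h : WhileA g pass cs pcount v) (hlt : pcount < g.PRD) : cs < g.PRD :=
  h.wa.slot_lt (c.w_pos he) hlt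

/-- **INTERFACE S7 → S3: `BookPre`** (the precondition of codebook_decode_scalar_raw, and the first clause of
codebook_decode_deinterleave_repeat's and residue_decode's) at a callee's entry state `s` inside decode_residue: `rdi = f`,
`rsi` = a codebook of `f`, the shadow clause for the live lists inside the function, a memory that differs from the entry memory
inside the footprint only, and `VorbisOK` of it (`Common.point.vorbis`, or `Entered.frame` after the inline stores). -/
example {u₀ : State} {g : G} (he : Entered u₀ g) (s : State) (hsh : ShadowPre g.others' g.frames' s)
    (hrdi : (s.reg .rdi).toNat = g.f) (i : Nat) (hi : (i : Int) < stb_vorbis.codebook_count s.mem g.f)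
    (hrsi : (s.reg .rsi).toNat = stb_vorbis.codebooks_at s.mem g.f i)
    (hs : Mem.SameExcept (g.spec.footprint g.e) g.e.mem s.mem)
    (hv : Real.VorbisOK g.len g.Blk s.mem g.f) : BookPre g.others' g.frames' g.Blk g.len s := by
  have hcfg := hv.config
  refine ⟨⟨hsh, ?_, ?_⟩, he.pre.env.ok, ?_, ?_, ?_⟩
  · rw [hrdi]
    exact he.reader'
  · rw [hrdi]
    exact hv.bits
  · rw [hrsi]
    refine ⟨_, hcfg.cb0.F2, ?_⟩
    have hcnt := hcfg.cb0.F1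
    have hi' : i < (stb_vorbis.codebook_count s.mem g.f).toNat := by omega
    constructor
    · show stb_vorbis.codebooks s.mem g.f ≤ stb_vorbis.codebooks_at s.mem g.f i
      unfold stb_vorbis.codebooks_at
      omega
    · show stb_vorbis.codebooks_at s.mem g.f i + Off.sizeof.Codebook ≤
        stb_vorbis.codebooks s.mem g.f + Off.sizeof.Codebook * (stb_vorbis.codebook_count s.mem g.f).toNat
      unfold stb_vorbis.codebooks_at
      simp only [voff]
      omega
  · rw [hrsi]
    exact hcfg.books i hi
  · rw [hrdi, hrsi]
    exact he.bookApart hs i hi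

/-- **INTERFACE S7 → S2: `ReaderPre`** (prep_huffman's precondition) at a callee's entry state inside decode_residue. -/
example {u₀ : State} {g : G} (he : Entered u₀ g) (s : State) (hsh : ShadowPre g.others' g.frames' s)
    (hrdi : (s.reg .rdi).toNat = g.f) (hb : Bits g.Blk g.len s.mem g.f) :
    (prep_huffman.spec g.others' g.frames' g.Blk g.len).pre s := by
  refine ⟨hsh, ?_, ?_⟩
  · rw [hrdi]
    exact he.reader'
  · rw [hrdi]
    exact hb

/-- **INTERFACE S7 → S1: `ArenaPre`** of setup_temp_malloc at its call in segment 1 (the frame is pushed, the arena is the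
entry's): OB1 at the shadow level from OB1 + `BlkLive`. -/
example {u₀ : State} {g : G} (he : Entered u₀ g) (s : State) (hsh : ShadowPre g.others g.frames' s)
    (hrdi : (s.reg .rdi).toNat = g.f) (har : ArenaOK g.A g.others s.mem g.f) :
    (setup_temp_malloc.spec g.others g.frames' g.A).pre s := by
  refine ⟨hsh, ?_, ?_, he.pre.arenaText⟩
  · rw [hrdi]
    have hob : g.Blk (objBlock g.f) := he.vorbis.obj
    have hl := he.pre.env.live _ hob
    unfold ObjLive
    refine hl.mono ?_
    intro x hx
    obtain ⟨o, ho, hb⟩ := hx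
    refine ⟨o, ?_, hb⟩
    unfold G.frames'
    rw [stackObjs_cons]
    rcases List.mem_append.mp ho with h | h
    · exact List.mem_append_left _ (List.mem_append_right _ h)
    · exact List.mem_append_right _ h
  · rw [hrdi]
    exact har

end Vorbis.Spec.DecodeResidueTest
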